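-- pv_equiv track=rewrite | github.com/risingfruition/AOC_2024 | d02.py | damp_all_dec_skip_left
-- ===== SOURCE A (Python) =====
-- def damp_all_dec_skip_left(line):
--     bad = 0
--     prev = None
--     for i, v in enumerate(line):
--         if i == 0:
--             prev = v
--             continue
--         if prev <= v or abs(prev - v) > 3:
--             if bad == 0:
--                 bad = 1
--                 # prev shouldn't change so we skip v
--                 continue
--             return False
--         prev = v
--     return True
-- ===== SOURCE B (Python) =====
-- def damp_all_dec_skip_left(line):
--     # Work on the difference list: a step is valid iff its diff is in 1..3;
--     # greedily skipping the right element of the first bad pair merges that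
--     # diff with the next one (their sum), and the remainder must be all-valid.
--     diffs = [a - b for a, b in zip(line, line[1:])]
--     for i, d in enumerate(diffs):
--         if not (1 <= d <= 3):
--             rest = diffs[i + 1:]
--             if not rest:
--                 return True
--             return 1 <= d + rest[0] <= 3 and all(1 <= e <= 3 for e in rest[1:])
--     return True
-- ===== Notes on version B (the rewrite author's own statement) =====
-- stated objective: alternative
-- what changed: B drops A's prev accumulator and bad flag entirely: it precomputes the list of consecutive differences and decides on that list alone -- all diffs in 1..3, or, at the first invalid diff, that diff merged (summed) with its successor is in 1..3 and every later diff is in 1..3.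
import Mathlib
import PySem

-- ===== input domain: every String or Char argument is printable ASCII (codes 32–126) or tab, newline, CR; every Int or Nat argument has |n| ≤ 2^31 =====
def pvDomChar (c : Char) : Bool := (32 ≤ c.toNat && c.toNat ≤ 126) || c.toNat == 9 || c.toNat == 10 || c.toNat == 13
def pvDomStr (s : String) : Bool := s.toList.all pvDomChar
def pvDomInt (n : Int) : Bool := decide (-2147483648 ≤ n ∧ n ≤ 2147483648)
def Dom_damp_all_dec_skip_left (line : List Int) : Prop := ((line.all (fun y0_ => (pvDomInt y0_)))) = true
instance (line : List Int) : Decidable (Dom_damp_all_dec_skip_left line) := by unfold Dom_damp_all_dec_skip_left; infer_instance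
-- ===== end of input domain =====

-- B recasts the check on the difference list (diffs): no prev accumulator and no bad flag;
-- a skip is the sum of the two diffs at the first invalid pair. Same O(n) cost, different decomposition.


-- ===== PORT A =====
-- A's single for-loop with state (bad, prev); the `i == 0` branch is the peeled head.
def dampALoop (bad : Int) (prev : Int) (rest : List Int) : Bool :=
  match rest with
  | [] => true
  | v :: t =>
      if prev ≤ v || (prev - v).natAbs > 3 then
        if bad == 0 then dampALoop 1 prev t   -- skip v, keep prev
        else false
      else dampALoop bad v t

def damp_all_dec_skip_left (line : List Int) : Bool :=
  match line with
  | [] => true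
  | h :: t => dampALoop 0 h t

-- ===== PORT B =====
-- valid step: diff in 1..3
def okd (d : Int) : Bool := 1 ≤ d && d ≤ 3

-- B's loop over the diff list: at the first invalid diff d, rest = diffs[i+1:];
-- empty rest → True, else merge d with rest[0] and require the tail all-valid.
def dampBDiffs (diffs : List Int) : Bool :=
  match diffs with
  | [] => true
  | d :: rest =>
      if okd d then dampBDiffs rest
      else
        match rest with
        | [] => true
        | e :: rest2 => okd (d + e) && rest2.all okd

def damp_all_dec_skip_left_alt (line : List Int) : Bool :=
  dampBDiffs ((line.zip line.tail).map (fun p => p.1 - p.2))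

-- ===== PRECONDITION & SPEC =====
def Spec_damp_all_dec_skip_left (line : List Int) (out : Bool) : Prop := out = damp_all_dec_skip_left_alt line
instance (line : List Int) (out : Bool) : Decidable (Spec_damp_all_dec_skip_left line out) := by unfold Spec_damp_all_dec_skip_left; infer_instance

-- ===== CLAIM (what is proved, stated in full; the proofs are below) =====
def Claim_equal_damp_all_dec_skip_left : Prop := ∀ (line : List Int), Dom_damp_all_dec_skip_left line → Spec_damp_all_dec_skip_left line (damp_all_dec_skip_left line)

-- ===== LEMMAS AND PROOFS =====

def diffsOf (line : List Int) : List Int := (line.zip line.tail).map (fun p => p.1 - p.2)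

theorem diffsOf_cons (p v : Int) (t : List Int) :
    diffsOf (p :: v :: t) = (p - v) :: diffsOf (v :: t) := by
  simp [diffsOf]

-- A's violation test is the negation of okd on the diff.
theorem cond_okd (p v : Int) :
    (p ≤ v || (p - v).natAbs > 3) = !okd (p - v) := by
  by_cases h1 : p ≤ v <;> by_cases h2 : (p - v).natAbs > 3 <;>
    simp [okd, h1, h2] <;> omega

-- After the flag is spent, A's loop is the all-valid check on the diffs.
theorem dampALoop_one (prev : Int) (rest : List Int) :
    dampALoop 1 prev rest = (diffsOf (prev :: rest)).all okd := by
  induction rest generalizing prev with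
  | nil => rfl
  | cons v t ih =>
      rw [diffsOf_cons]
      simp only [dampALoop, cond_okd, List.all_cons]
      by_cases h : okd (prev - v) = true
      · simp [h, ih]
      · simp [Bool.not_eq_true] at h
        simp [h]

-- A's fresh loop equals B's diff-list check.
theorem dampALoop_zero (prev : Int) (rest : List Int) :
    dampALoop 0 prev rest = dampBDiffs (diffsOf (prev :: rest)) := by
  induction rest generalizing prev with
  | nil => rfl
  | cons v t ih =>
      rw [diffsOf_cons]
      simp only [dampALoop, cond_okd, dampBDiffs]
      by_cases h : okd (prev - v) = true
      · simp [h, ih]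
      · simp only [Bool.not_eq_true] at h
        simp only [h, Bool.not_false, if_true]
        match t with
        | [] => rfl
        | w :: t2 =>
            rw [diffsOf_cons]
            simp only [dampALoop, cond_okd]
            have hm : prev - v + (v - w) = prev - w := by ring
            by_cases h2 : okd (prev - w) = true
            · simp [h2, hm, dampALoop_one]
            · simp only [Bool.not_eq_true] at h2
              simp [h2, hm]

-- ===== VERDICT (by name: the statement is the Claim_ definition above) =====
theorem damp_all_dec_skip_left_spec : Claim_equal_damp_all_dec_skip_left := by
  intro line _
  unfold Spec_damp_all_dec_skip_left damp_all_dec_skip_left damp_all_dec_skip_left_alt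
  match line with
  | [] => rfl
  | h :: t => simpa [diffsOf] using dampALoop_zero h t
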